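-- pv_equiv track=rewrite | github.com/Xoleski/Belhard | Lesson_06/Task_6.py | sort_chet_l
-- ===== SOURCE A (Python) =====
-- def sort_chet_l(list_b: list):
--     list_b = (list(filter(lambda x: not x % 2, list_b))
--               + list(filter(lambda x: x % 2, list_b)))
--     b = list(filter(lambda x: not x, list_b))
--     i = 0
--     while i < len(b):
--         list_b.remove(b[i])
--         i += 1
--     return list_b
-- ===== SOURCE B (Python) =====
-- def sort_chet_l(list_b: list):
--     return [x for x in sorted(list_b, key=lambda x: x % 2) if x]
-- ===== Notes on version B (the rewrite author's own statement) =====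
-- stated objective: idiomatic
-- what changed: Replaces the two filter passes plus a quadratic list.remove loop (one linear remove per zero) with a single stable sort by parity key followed by one truthiness filter.
import Mathlib
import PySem

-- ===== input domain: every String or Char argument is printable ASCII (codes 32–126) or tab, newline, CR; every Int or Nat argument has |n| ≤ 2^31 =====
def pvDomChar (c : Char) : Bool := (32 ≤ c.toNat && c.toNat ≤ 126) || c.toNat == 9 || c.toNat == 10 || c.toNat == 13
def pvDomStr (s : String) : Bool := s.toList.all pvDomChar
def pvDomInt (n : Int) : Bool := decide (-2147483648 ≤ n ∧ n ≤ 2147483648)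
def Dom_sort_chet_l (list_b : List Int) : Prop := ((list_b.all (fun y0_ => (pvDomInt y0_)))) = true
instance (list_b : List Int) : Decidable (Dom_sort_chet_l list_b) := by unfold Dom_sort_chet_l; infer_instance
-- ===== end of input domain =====

-- B replaces A's two filter passes + quadratic per-zero list.remove loop by one stable
-- sort on the parity key followed by one truthiness filter (idiomatic one-liner).

-- ===== PORT A =====
-- the while loop 'i = 0; while i < len(b): list_b.remove(b[i]); i += 1' as a fold over b;
-- the 'none' branch is where Python would raise ValueError — unreachable here, since each
-- removed b[i] = 0 is still present in the list (proved implicitly by the equivalence).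
def pvRemoveLoop (cur : List Int) (b : List Int) : List Int :=
  b.foldl (fun cur v =>
    match PySem.List.remove? cur v with
    | some l => l
    | none => cur) cur

def sort_chet_l (list_b : List Int) : List Int :=
  -- list_b = list(filter(not x % 2)) + list(filter(x % 2))
  let lb := list_b.filter (fun x => decide (PySem.Int.mod x 2 = 0)) ++
            list_b.filter (fun x => decide (PySem.Int.mod x 2 ≠ 0))
  -- b = list(filter(not x))
  let b := lb.filter (fun x => decide (x = 0))
  pvRemoveLoop lb b

-- ===== PORT B =====
def sort_chet_l_alt (list_b : List Int) : List Int :=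
  (PySem.List.sorted list_b (fun x => PySem.Int.mod x 2)).filter (fun x => decide (x ≠ 0))

-- ===== PRECONDITION & SPEC =====
def Spec_sort_chet_l (list_b : List Int) (out : List Int) : Prop := out = sort_chet_l_alt list_b
instance (list_b : List Int) (out : List Int) : Decidable (Spec_sort_chet_l list_b out) := by unfold Spec_sort_chet_l; infer_instance

-- ===== CLAIM (what is proved, stated in full; the proofs are below) =====
def Claim_equal_sort_chet_l : Prop := ∀ (list_b : List Int), Dom_sort_chet_l list_b → Spec_sort_chet_l list_b (sort_chet_l list_b)

-- ===== LEMMAS AND PROOFS =====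

-- removing a value that every element of b equals commutes past a different head element
lemma pvRemoveLoop_cons_ne (b : List Int) (hb : ∀ v ∈ b, v = (0:Int)) :
    ∀ (x : Int) (l : List Int), x ≠ 0 → pvRemoveLoop (x :: l) b = x :: pvRemoveLoop l b := by
  induction b with
  | nil => intro x l _; rfl
  | cons v b ih =>
    intro x l hx
    have hv : v = 0 := hb v (List.mem_cons_self)
    subst hv
    have hb' : ∀ v ∈ b, v = (0:Int) := fun v hv => hb v (List.mem_cons_of_mem _ hv)
    simp only [pvRemoveLoop, List.foldl_cons]
    rw [PySem.List.remove?_cons_of_ne _ hx]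
    cases h : PySem.List.remove? l 0 with
    | none => simpa [h] using ih hb' x l hx
    | some l' => simpa [h] using ih hb' x l' hx

-- the whole remove loop, fed exactly the zeros of l, deletes exactly the zeros of l
lemma pvRemoveLoop_filter (l : List Int) :
    pvRemoveLoop l (l.filter (fun x => decide (x = 0))) = l.filter (fun x => decide (x ≠ 0)) := by
  induction l with
  | nil => rfl
  | cons x l ih =>
    by_cases hx : x = 0
    · subst hx
      simpa [pvRemoveLoop, List.foldl_cons] using ih
    · have h0 : decide (x = (0:Int)) = false := decide_eq_false hx
      have h1 : decide (x ≠ (0:Int)) = true := decide_eq_true hx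
      have hb : ∀ v ∈ l.filter (fun x => decide (x = 0)), v = (0:Int) := by
        intro v hv
        simpa using (List.of_mem_filter hv)
      rw [List.filter_cons, List.filter_cons, h0, h1, if_neg (by simp), if_pos rfl,
        pvRemoveLoop_cons_ne _ hb x l hx, ih]

-- one-step unfolding of PySem's insertion (definitional)
lemma insertBy_cons {α : Type} (before : α → α → Bool) (x y : α) (ys : List α) :
    PySem.List.insertBy before x (y :: ys) =
      if before x y then x :: y :: ys else y :: PySem.List.insertBy before x ys := rfl

-- inserting into an evens-block ++ odds-block by the parity order lands at the block boundary
lemma insertBy_parity_append (x : Int) (hx : PySem.Int.mod x 2 = 0) :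
    ∀ (E O : List Int), (∀ y ∈ E, PySem.Int.mod y 2 = 0) → (∀ y ∈ O, PySem.Int.mod y 2 = 1) →
      PySem.List.insertBy
        (fun a b => decide (PySem.Int.mod a 2 < PySem.Int.mod b 2)) x (E ++ O) = E ++ x :: O := by
  intro E
  induction E with
  | nil =>
    intro O _ hO
    cases O with
    | nil => rfl
    | cons y ys =>
      have h1 : PySem.Int.mod y 2 = 1 := hO y List.mem_cons_self
      have hb : decide (PySem.Int.mod x 2 < PySem.Int.mod y 2) = true := by rw [hx, h1]; rfl
      rw [List.nil_append, insertBy_cons]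
      simp only [hb]
      rw [if_pos trivial]
      rfl
  | cons e E ih =>
    intro O hE hO
    have he : PySem.Int.mod e 2 = 0 := hE e List.mem_cons_self
    have hE' : ∀ y ∈ E, PySem.Int.mod y 2 = 0 := fun y hy => hE y (List.mem_cons_of_mem _ hy)
    have hb : decide (PySem.Int.mod x 2 < PySem.Int.mod e 2) = false := by rw [hx, he]; rfl
    rw [List.cons_append, insertBy_cons]
    simp only [hb]
    rw [if_neg Bool.false_ne_true, ih O hE' hO]
    rfl

-- the insertion-sort fold on acc = evens ++ odds keeps that shape, appending stably
lemma foldl_insertBy_parity (xs : List Int) :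
    ∀ (E O : List Int), (∀ y ∈ E, PySem.Int.mod y 2 = 0) → (∀ y ∈ O, PySem.Int.mod y 2 = 1) →
      xs.foldl (fun acc x =>
          PySem.List.insertBy (fun a b => decide (PySem.Int.mod a 2 < PySem.Int.mod b 2)) x acc)
        (E ++ O)
      = (E ++ xs.filter (fun x => decide (PySem.Int.mod x 2 = 0))) ++
        (O ++ xs.filter (fun x => decide (PySem.Int.mod x 2 ≠ 0))) := by
  induction xs with
  | nil => intro E O _ _; simp
  | cons x xs ih =>
    intro E O hE hO
    rcases PySem.Int.mod_two_eq x with hx | hx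
    · -- even: joins the end of the evens block
      have hE' : ∀ y ∈ E ++ [x], PySem.Int.mod y 2 = 0 := by
        intro y hy
        rcases List.mem_append.1 hy with h | h
        · exact hE y h
        · simpa [List.mem_singleton.1 h] using hx
      have h0 : decide (PySem.Int.mod x 2 = 0) = true := by rw [hx]; rfl
      have h1 : decide (PySem.Int.mod x 2 ≠ 0) = false := by rw [hx]; rfl
      simp only [List.foldl_cons]
      rw [insertBy_parity_append x hx E O hE hO,
        show E ++ x :: O = (E ++ [x]) ++ O from by simp,
        ih (E ++ [x]) O hE' hO, List.filter_cons, List.filter_cons, h0, h1]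
      simp
    · -- odd: insertBy appends at the very end (its key 1 is never < any key ≤ 1)
      have hnb : ∀ y ∈ E ++ O,
          (fun a b => decide (PySem.Int.mod a 2 < PySem.Int.mod b 2)) x y = false := by
        intro y hy
        show decide (PySem.Int.mod x 2 < PySem.Int.mod y 2) = false
        rcases List.mem_append.1 hy with h | h
        · rw [hx, hE y h]; rfl
        · rw [hx, hO y h]; rfl
      have hO' : ∀ y ∈ O ++ [x], PySem.Int.mod y 2 = 1 := by
        intro y hy
        rcases List.mem_append.1 hy with h | h
        · exact hO y h
        · simpa [List.mem_singleton.1 h] using hx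
      have h0 : decide (PySem.Int.mod x 2 = 0) = false := by rw [hx]; rfl
      have h1 : decide (PySem.Int.mod x 2 ≠ 0) = true := by rw [hx]; rfl
      simp only [List.foldl_cons]
      rw [PySem.List.insertBy_of_forall_not_before
            (fun a b => decide (PySem.Int.mod a 2 < PySem.Int.mod b 2)) x (E ++ O) hnb,
        List.append_assoc, ih E (O ++ [x]) hE hO',
        List.filter_cons, List.filter_cons, h0, h1]
      simp

-- sorting by the 0/1 parity key is exactly the stable evens-then-odds partition
lemma sorted_parity (xs : List Int) :
    PySem.List.sorted xs (fun x => PySem.Int.mod x 2) =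
      xs.filter (fun x => decide (PySem.Int.mod x 2 = 0)) ++
      xs.filter (fun x => decide (PySem.Int.mod x 2 ≠ 0)) := by
  rw [PySem.List.sorted_eq_foldl_insertBy]
  simpa using foldl_insertBy_parity xs [] [] (by simp) (by simp)

-- ===== VERDICT (by name: the statement is the Claim_ definition above) =====
theorem sort_chet_l_spec : Claim_equal_sort_chet_l := by
  intro list_b _
  unfold Spec_sort_chet_l sort_chet_l sort_chet_l_alt
  rw [sorted_parity, pvRemoveLoop_filter]
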